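-- pv_equiv track=rewrite | github.com/rossfreedman/rally_tennis | api/training_data.py | find_topic_data
-- ===== SOURCE A (Python) =====
-- def find_topic_data(training_data, topic):
--     """
--     Find training data for a specific topic with fuzzy matching.
--
--     Args:
--         training_data (dict): The complete training data dictionary
--         topic (str): The topic to search for
--
--     Returns:
--         tuple: (topic_key, topic_data) if found, (None, None) if not found
--     """
--     topic_lower = topic.lower().strip()
--
--     # First try exact match (case-insensitive)
--     for key in training_data.keys():
--         if key.lower() == topic_lower:
--             return key, training_data[key]
--
--     # If no exact match, try partial match
--     for key in training_data.keys():
--         key_lower = key.lower()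
--         if topic_lower in key_lower or key_lower in topic_lower:
--             return key, training_data[key]
--
--     # Try matching individual words
--     topic_words = topic_lower.split()
--     best_match = None
--     best_score = 0
--
--     for key in training_data.keys():
--         key_lower = key.lower()
--         score = 0
--         for word in topic_words:
--             if word in key_lower:
--                 score += 1
--
--         if score > best_score and score >= len(topic_words) // 2:  # At least half the words match
--             best_score = score
--             best_match = (key, training_data[key])
--
--     return best_match if best_match else (None, None)
-- ===== SOURCE B (Python) =====
-- def find_topic_data(training_data, topic):
--     """Single stateful pass over the keys instead of three separate scans."""
--     topic_lower = topic.lower().strip()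
--     topic_words = topic_lower.split()
--     half = len(topic_words) // 2
--     first_partial = None
--     best_word = None
--     best_score = 0
--     for key, data in training_data.items():
--         key_lower = key.lower()
--         if key_lower == topic_lower:
--             return key, data  # first exact match wins immediately
--         if first_partial is None and (topic_lower in key_lower or key_lower in topic_lower):
--             first_partial = (key, data)
--         score = len([w for w in topic_words if w in key_lower])
--         if score > best_score and score >= half:
--             best_score = score
--             best_word = (key, data)
--     if first_partial is not None:
--         return first_partial
--     if best_word is not None:
--         return best_word
--     return (None, None)
-- ===== Notes on version B (the rewrite author's own statement) =====
-- stated objective: alternative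
-- what changed: A's three sequential full scans over the keys (exact, then substring-partial, then best word-overlap score) are fused into one stateful pass that returns at the first exact match and otherwise remembers the first partial match and the running best word-score match, choosing by tier priority after the loop.
import Mathlib
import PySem

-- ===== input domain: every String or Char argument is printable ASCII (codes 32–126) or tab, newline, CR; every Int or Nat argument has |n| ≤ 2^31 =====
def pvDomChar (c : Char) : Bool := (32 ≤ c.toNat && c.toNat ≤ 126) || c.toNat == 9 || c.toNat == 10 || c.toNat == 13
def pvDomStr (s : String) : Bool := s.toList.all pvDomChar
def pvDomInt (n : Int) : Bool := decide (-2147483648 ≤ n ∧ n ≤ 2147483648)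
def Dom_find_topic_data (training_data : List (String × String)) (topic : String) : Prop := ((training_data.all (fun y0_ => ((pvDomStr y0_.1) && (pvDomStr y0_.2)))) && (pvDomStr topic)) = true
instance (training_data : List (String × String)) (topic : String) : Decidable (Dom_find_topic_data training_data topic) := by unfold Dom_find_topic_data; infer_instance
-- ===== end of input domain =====

-- B replaces A's three separate scans over the keys (exact, partial, best-word-score)
-- by one stateful pass that early-returns on the first exact match; same return value.

-- ===== PORT A =====
-- first loop of A: first key with key.lower() == topic_lower (dict keys are unique, so
-- training_data[key] is the value paired with key in the items list)
def pvScanExact (tl : String) : List (String × String) → Option (String × String)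
  | [] => none
  | (k, v) :: rest =>
    if PySem.Str.lower k == tl then some (k, v) else pvScanExact tl rest

-- second loop of A: first key with a substring match either way
def pvScanPartial (tl : String) : List (String × String) → Option (String × String)
  | [] => none
  | (k, v) :: rest =>
    let kl := PySem.Str.lower k
    if PySem.Str.isIn tl kl || PySem.Str.isIn kl tl then some (k, v) else pvScanPartial tl rest

-- inner word loop of A: score = number of topic words contained in key_lower
def pvScoreA (words : List String) (kl : String) : Nat :=
  words.foldl (fun s w => if PySem.Str.isIn w kl then s + 1 else s) 0

-- third loop of A: best (key, data) by strict score improvement over the threshold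
def pvBestLoop (words : List String) (half : Nat) :
    List (String × String) → Option (String × String) × Nat → Option (String × String) × Nat
  | [], st => st
  | (k, v) :: rest, (best, bs) =>
    let kl := PySem.Str.lower k
    let score := pvScoreA words kl
    if score > bs ∧ score ≥ half then pvBestLoop words half rest (some (k, v), score)
    else pvBestLoop words half rest (best, bs)

def find_topic_data (training_data : List (String × String)) (topic : String) :
    Option String × Option String :=
  let tl := PySem.Str.strip (PySem.Str.lower topic)
  let items := (PySem.Dict.ofList training_data).items
  match pvScanExact tl items with
  | some kv => (some kv.1, some kv.2)
  | none =>
    match pvScanPartial tl items with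
    | some kv => (some kv.1, some kv.2)
    | none =>
      let words := PySem.Str.split₀ tl
      match (pvBestLoop words (words.length / 2) items (none, 0)).1 with
      | some kv => (some kv.1, some kv.2)
      | none => (none, none)

-- ===== PORT B =====
-- B's single pass: return at the first exact match, remember the first partial match and
-- the best word-score match, and pick in that priority order after the loop
def pvAltLoop (tl : String) (words : List String) (half : Nat) :
    List (String × String) → Option (String × String) → Option (String × String) → Nat →
    Option String × Option String
  | [], fp, bw, _ =>
    match fp with
    | some kv => (some kv.1, some kv.2)
    | none =>
      match bw with
      | some kv => (some kv.1, some kv.2)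
      | none => (none, none)
  | (k, v) :: rest, fp, bw, bs =>
    let kl := PySem.Str.lower k
    if kl == tl then (some k, some v)
    else
      let fp' := if fp.isNone && (PySem.Str.isIn tl kl || PySem.Str.isIn kl tl)
                 then some (k, v) else fp
      let score := (words.filter (fun w => PySem.Str.isIn w kl)).length
      if score > bs ∧ score ≥ half then pvAltLoop tl words half rest fp' (some (k, v)) score
      else pvAltLoop tl words half rest fp' bw bs

def find_topic_data_alt (training_data : List (String × String)) (topic : String) :
    Option String × Option String :=
  let tl := PySem.Str.strip (PySem.Str.lower topic)
  let words := PySem.Str.split₀ tl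
  pvAltLoop tl words (words.length / 2) (PySem.Dict.ofList training_data).items none none 0

-- ===== PRECONDITION & SPEC =====
def Spec_find_topic_data (training_data : List (String × String)) (topic : String) (out : Option String × Option String) : Prop := out = find_topic_data_alt training_data topic
instance (training_data : List (String × String)) (topic : String) (out : Option String × Option String) : Decidable (Spec_find_topic_data training_data topic out) := by unfold Spec_find_topic_data; infer_instance

-- ===== CLAIM (what is proved, stated in full; the proofs are below) =====
def Claim_equal_find_topic_data : Prop := ∀ (training_data : List (String × String)) (topic : String), Dom_find_topic_data training_data topic → Spec_find_topic_data training_data topic (find_topic_data training_data topic)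

-- ===== LEMMAS AND PROOFS =====

-- A's counting loop computes the length of B's filtered list
theorem pvScoreA_eq_filter (words : List String) (kl : String) :
    pvScoreA words kl = (words.filter (fun w => PySem.Str.isIn w kl)).length := by
  have h : ∀ (p : String → Bool) (l : List String) (n : Nat),
      l.foldl (fun s w => if p w then s + 1 else s) n = n + (l.filter p).length := by
    intro p l
    induction l with
    | nil => intro n; simp
    | cons w rest ih =>
      intro n
      by_cases hw : p w = true
      · rw [List.foldl_cons, if_pos hw, ih]
        simp [hw]
        omega
      · rw [List.foldl_cons, if_neg hw, ih]
        simp [hw]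
  simpa using h (fun w => PySem.Str.isIn w kl) words 0

-- the single pass equals the three-scan cascade, for any intermediate state
theorem pvAltLoop_eq (tl : String) (words : List String) (half : Nat) :
    ∀ (l : List (String × String)) (fp bw : Option (String × String)) (bs : Nat),
      pvAltLoop tl words half l fp bw bs =
        match pvScanExact tl l with
        | some kv => (some kv.1, some kv.2)
        | none =>
          match fp.orElse (fun _ => pvScanPartial tl l) with
          | some kv => (some kv.1, some kv.2)
          | none =>
            match (pvBestLoop words half l (bw, bs)).1 with
            | some kv => (some kv.1, some kv.2)
            | none => (none, none) := by
  intro l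
  induction l with
  | nil =>
    intro fp bw bs
    cases fp <;> cases bw <;> simp [pvAltLoop, pvScanExact, pvScanPartial, pvBestLoop]
  | cons p rest ih =>
    intro fp bw bs
    obtain ⟨k, v⟩ := p
    by_cases hex : (PySem.Str.lower k == tl) = true
    · simp [pvAltLoop, pvScanExact, hex]
    · have hsc : (List.filter (fun w => PySem.Chars.isIn w.toList (PySem.Chars.lower k.toList)) words).length
          = pvScoreA words (PySem.Str.lower k) := by
        simpa using (pvScoreA_eq_filter words (PySem.Str.lower k)).symm
      by_cases hpar : (PySem.Chars.isIn tl.toList (PySem.Chars.lower k.toList) = true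
          ∨ PySem.Chars.isIn (PySem.Chars.lower k.toList) tl.toList = true) <;>
        by_cases hbr : (bs < pvScoreA words (PySem.Str.lower k)
          ∧ half ≤ pvScoreA words (PySem.Str.lower k)) <;>
        cases fp <;>
          simp [pvAltLoop, pvScanExact, pvScanPartial, pvBestLoop, hex, hsc, hpar, hbr, ih]

-- ===== VERDICT (by name: the statement is the Claim_ definition above) =====
theorem find_topic_data_spec : Claim_equal_find_topic_data := by
  intro training_data topic _
  unfold Spec_find_topic_data find_topic_data find_topic_data_alt
  rw [pvAltLoop_eq]
  simp
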